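-- pv_equiv track=rewrite | github.com/linfanluntan/amb-seg-uq | models/resenc_unet3d.py | _compute_pool_kernels
-- ===== SOURCE A (Python) =====
-- from typing import List, Optional, Tuple, Dict
--
-- def _compute_pool_kernels(
--     patch_size: Tuple[int, ...], n_stages: int
-- ) -> List[List[int]]:
--     """
--     Compute per-stage pool kernel sizes from patch dimensions.
--     nnU-Net convention: stride 2 along axes that are still >= some minimum (8).
--     Stage 0 has no pooling (stride=1).
--     """
--     kernels = [[1, 1, 1]]  # Stage 0: no downsampling
--     current_size = list(patch_size)
--     for s in range(1, n_stages):
--         k = []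
--         for d in range(3):
--             if current_size[d] >= 8:
--                 k.append(2)
--                 current_size[d] //= 2
--             else:
--                 k.append(1)
--         kernels.append(k)
--     return kernels
-- ===== SOURCE B (Python) =====
-- def _compute_pool_kernels(patch_size, n_stages):
--     kernels = [[1, 1, 1]]
--     for s in range(1, n_stages):
--         kernels.append([2 if patch_size[d] >> (s - 1) >= 8 else 1 for d in range(3)])
--     return kernels
-- ===== Notes on version B (the rewrite author's own statement) =====
-- stated objective: simpler
-- what changed: B drops A's mutable running current_size state: each stage's kernel entry is computed directly by the closed form patch_size[d] // 2**(s-1) >= 8 instead of carrying halved sizes across stages.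
import Mathlib
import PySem

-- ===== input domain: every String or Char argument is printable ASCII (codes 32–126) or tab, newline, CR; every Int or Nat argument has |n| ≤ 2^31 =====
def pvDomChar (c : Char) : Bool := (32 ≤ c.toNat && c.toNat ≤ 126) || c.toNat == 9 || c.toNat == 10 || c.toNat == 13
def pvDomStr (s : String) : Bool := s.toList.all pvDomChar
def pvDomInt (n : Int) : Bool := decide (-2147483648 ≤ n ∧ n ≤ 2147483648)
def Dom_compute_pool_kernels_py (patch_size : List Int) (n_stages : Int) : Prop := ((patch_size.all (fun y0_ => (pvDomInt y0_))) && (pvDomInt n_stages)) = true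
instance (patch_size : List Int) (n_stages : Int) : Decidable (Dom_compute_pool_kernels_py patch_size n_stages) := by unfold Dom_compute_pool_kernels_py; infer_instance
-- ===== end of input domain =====

-- B replaces A's mutable running current_size with the per-stage closed form
-- patch_size[d] // 2**(s-1) >= 8; objective: simpler (stateless stages).

-- ===== PORT A =====
-- inner loop 'for d in range(3)' of A, carrying (k, current_size)
def pvInnerA (cs : List Int) : List Int × List Int :=
  (PySem.List.pyRange 0 3 1).foldl
    (fun (p : List Int × List Int) d =>
      if PySem.List.pyGetD p.2 d 0 ≥ 8 then
        (p.1 ++ [2], PySem.List.pySetD p.2 d (PySem.Int.floordiv (PySem.List.pyGetD p.2 d 0) 2))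
      else
        (p.1 ++ [1], p.2))
    ([], cs)

def compute_pool_kernels_py (patch_size : List Int) (n_stages : Int) : List (List Int) :=
  let res := (PySem.List.pyRange 1 n_stages 1).foldl
    (fun (st : List (List Int) × List Int) _s =>
      let inner := pvInnerA st.2
      (st.1 ++ [inner.1], inner.2))
    ([[1, 1, 1]], patch_size)
  res.1

-- ===== PORT B =====
def compute_pool_kernels_py_alt (patch_size : List Int) (n_stages : Int) : List (List Int) :=
  (PySem.List.pyRange 1 n_stages 1).foldl
    (fun ks s =>
      ks ++ [(PySem.List.pyRange 0 3 1).map (fun d =>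
        if PySem.List.pyGetD patch_size d 0 >>> (s - 1).toNat ≥ 8
        then (2 : Int) else 1)])
    [[1, 1, 1]]

-- ===== PRECONDITION & SPEC =====
-- Pre_ excludes exactly the inputs where Python A raises IndexError
-- (n_stages ≥ 2 with fewer than 3 patch dimensions); B raises there too.
def Pre_compute_pool_kernels_py (patch_size : List Int) (n_stages : Int) : Prop :=
  2 ≤ n_stages → 3 ≤ patch_size.length
instance (patch_size : List Int) (n_stages : Int) : Decidable (Pre_compute_pool_kernels_py patch_size n_stages) := by unfold Pre_compute_pool_kernels_py; infer_instance

def pvWitness_compute_pool_kernels_py : List Int × Int := ([64, 48, 7], 4)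

def Spec_compute_pool_kernels_py (patch_size : List Int) (n_stages : Int) (out : List (List Int)) : Prop := out = compute_pool_kernels_py_alt patch_size n_stages
instance (patch_size : List Int) (n_stages : Int) (out : List (List Int)) : Decidable (Spec_compute_pool_kernels_py patch_size n_stages out) := by unfold Spec_compute_pool_kernels_py; infer_instance

-- ===== CLAIM (what is proved, stated in full; the proofs are below) =====
def Claim_equal_compute_pool_kernels_py : Prop := ∀ (patch_size : List Int) (n_stages : Int), Dom_compute_pool_kernels_py patch_size n_stages → Pre_compute_pool_kernels_py patch_size n_stages → Spec_compute_pool_kernels_py patch_size n_stages (compute_pool_kernels_py patch_size n_stages)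

-- ===== LEMMAS AND PROOFS =====

-- one application of A's per-dimension update
def pkStep (x : Int) : Int := if x ≥ 8 then PySem.Int.floordiv x 2 else x
-- B's closed-form kernel entry after t previous stages
def pkC (t : Nat) (x : Int) : Int :=
  if PySem.Int.floordiv x (2 ^ t) ≥ 8 then 2 else 1

-- indexing/update of a ≥3-element list at the three literal indices A's inner loop uses
theorem pvG0 (x y z d : Int) (r : List Int) : PySem.List.pyGetD (x :: y :: z :: r) 0 d = x := by simp [pysem]
theorem pvG1 (x y z d : Int) (r : List Int) : PySem.List.pyGetD (x :: y :: z :: r) 1 d = y := by simp [pysem]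
theorem pvG2 (x y z d : Int) (r : List Int) : PySem.List.pyGetD (x :: y :: z :: r) 2 d = z := by simp [pysem]
theorem pvS0 (x y z v : Int) (r : List Int) : PySem.List.pySetD (x :: y :: z :: r) 0 v = v :: y :: z :: r := by simp [pysem]
theorem pvS1 (x y z v : Int) (r : List Int) : PySem.List.pySetD (x :: y :: z :: r) 1 v = x :: v :: z :: r := by simp [pysem]
theorem pvS2 (x y z v : Int) (r : List Int) : PySem.List.pySetD (x :: y :: z :: r) 2 v = x :: y :: v :: r := by simp [pysem]

theorem pvInnerA_cons (a b c : Int) (r : List Int) :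
    pvInnerA (a :: b :: c :: r) =
      ([(if a ≥ 8 then 2 else 1), (if b ≥ 8 then 2 else 1), (if c ≥ 8 then 2 else 1)],
        pkStep a :: pkStep b :: pkStep c :: r) := by
  have h : PySem.List.pyRange 0 3 1 = [0, 1, 2] := rfl
  simp only [pvInnerA, h, List.foldl_cons, List.foldl_nil]
  by_cases h1 : a ≥ 8 <;> by_cases h2 : b ≥ 8 <;> by_cases h3 : c ≥ 8 <;>
    simp [pvG1, pvG2, pvS0, pvS1, pvS2, h1, h2, h3, pkStep]

theorem pkStep_iter_of_ge (x : Int) (n : Nat) (h : 8 ≤ PySem.Int.floordiv x (2 ^ n)) :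
    pkStep^[n] x = PySem.Int.floordiv x (2 ^ n) := by
  induction n with
  | zero => simp [PySem.Int.floordiv_eq_ediv_of_pos]
  | succ n ih =>
    rw [PySem.Int.floordiv_eq_ediv_of_pos (by positivity)] at h ⊢
    have hsplit : x / 2 ^ (n + 1) = x / 2 ^ n / 2 := by
      rw [Int.ediv_ediv_of_nonneg (by positivity : (0:Int) ≤ 2 ^ n), pow_succ]
    have hn : 8 ≤ x / 2 ^ n := by rw [hsplit] at h; omega
    have hiter : pkStep^[n] x = x / 2 ^ n := by
      rw [ih (by rw [PySem.Int.floordiv_eq_ediv_of_pos (by positivity)]; exact hn)]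
      exact PySem.Int.floordiv_eq_ediv_of_pos (by positivity)
    rw [Function.iterate_succ_apply', hiter, pkStep, if_pos (by omega),
      PySem.Int.floordiv_eq_ediv_of_pos (by omega), hsplit]

theorem pkStep_iter_of_lt (x : Int) (n : Nat) (h : PySem.Int.floordiv x (2 ^ n) < 8) :
    pkStep^[n] x < 8 := by
  induction n with
  | zero => simpa [PySem.Int.floordiv_eq_ediv_of_pos] using h
  | succ n ih =>
    rw [PySem.Int.floordiv_eq_ediv_of_pos (by positivity)] at h
    have hsplit : x / 2 ^ (n + 1) = x / 2 ^ n / 2 := by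
      rw [Int.ediv_ediv_of_nonneg (by positivity : (0:Int) ≤ 2 ^ n), pow_succ]
    by_cases hn : 8 ≤ x / 2 ^ n
    · have hiter := pkStep_iter_of_ge x n
        (by rw [PySem.Int.floordiv_eq_ediv_of_pos (by positivity)]; exact hn)
      rw [Function.iterate_succ_apply', hiter,
        PySem.Int.floordiv_eq_ediv_of_pos (by positivity), pkStep,
        if_pos (by omega), PySem.Int.floordiv_eq_ediv_of_pos (by omega)]
      omega
    · have hlt : pkStep^[n] x < 8 := by
        apply ih; rw [PySem.Int.floordiv_eq_ediv_of_pos (by positivity)]; omega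
      rw [Function.iterate_succ_apply', pkStep, if_neg (by omega)]
      exact hlt

theorem pkKer_iter (x : Int) (n : Nat) :
    (if pkStep^[n] x ≥ 8 then (2 : Int) else 1) = pkC n x := by
  unfold pkC
  by_cases h : 8 ≤ PySem.Int.floordiv x (2 ^ n)
  · rw [if_pos h, if_pos (by rw [pkStep_iter_of_ge x n h]; exact h)]
  · rw [if_neg h, if_neg (by have := pkStep_iter_of_lt x n (by omega); omega)]

-- A's outer-loop body iterated m times from the initial state
def pvStageA (st : List (List Int) × List Int) : List (List Int) × List Int :=
  let inner := pvInnerA st.2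
  (st.1 ++ [inner.1], inner.2)

theorem pvStageA_iter (x y z : Int) (r : List Int) (m : Nat) :
    pvStageA^[m] ([[1, 1, 1]], x :: y :: z :: r) =
      ([[1, 1, 1]] ++ (List.range m).map (fun t => [pkC t x, pkC t y, pkC t z]),
        pkStep^[m] x :: pkStep^[m] y :: pkStep^[m] z :: r) := by
  induction m with
  | zero => simp
  | succ m ih =>
    rw [Function.iterate_succ_apply' pvStageA, ih]
    simp only [pvStageA, pvInnerA_cons, List.range_succ, List.map_append, List.map_cons,
      List.map_nil, List.append_assoc, Function.iterate_succ_apply']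
    rw [pkKer_iter, pkKer_iter, pkKer_iter]

-- ===== VERDICT (by name: the statement is the Claim_ definition above) =====
theorem compute_pool_kernels_py_spec : Claim_equal_compute_pool_kernels_py := by
  intro patch n _hdom hpre
  unfold Spec_compute_pool_kernels_py compute_pool_kernels_py compute_pool_kernels_py_alt
  by_cases hn : n ≤ 1
  · rw [PySem.List.pyRange_one_eq_nil (by omega)]
    simp
  · have h3 : 3 ≤ patch.length := hpre (by omega)
    obtain ⟨x, y, z, r, rfl⟩ : ∃ x y z r, patch = x :: y :: z :: r := by
      match patch, h3 with
      | x :: y :: z :: r, _ => exact ⟨x, y, z, r, rfl⟩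
    -- A's fold ignores the loop variable: it is pvStageA iterated len(range(1, n)) times
    have hA : ((PySem.List.pyRange 1 n 1).foldl
        (fun (st : List (List Int) × List Int) _s => pvStageA st)
        ([[1, 1, 1]], x :: y :: z :: r)) =
        pvStageA^[(PySem.List.pyRange 1 n 1).length] ([[1, 1, 1]], x :: y :: z :: r) :=
      List.foldl_const pvStageA _ _
    simp only [pvStageA] at hA
    rw [hA, PySem.List.length_pyRange_one, pvStageA_iter]
    -- B's fold is [[1,1,1]] ++ one stage row per s ∈ range(1, n)
    rw [PySem.List.foldl_append_singleton_eq_map, PySem.List.pyRange_one 1 n]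
    simp only [List.map_map]
    congr 1
    apply List.map_congr_left
    intro k _hk
    have hexp : ((1 : Int) + (k : Int) - 1).toNat = k := by omega
    have hsh : ∀ v : Int, v >>> (k : Int) = PySem.Int.floordiv v (2 ^ k) := fun v => by
      rw [Int.shiftRight_natCast_right, Int.shiftRight_eq_div_pow,
        PySem.Int.floordiv_eq_ediv_of_pos (by positivity)]
      push_cast
      rfl
    simp only [Function.comp, hexp, show PySem.List.pyRange 0 3 1 = [0, 1, 2] from rfl,
      List.map_cons, List.map_nil, pkC, pvG0, pvG1, pvG2, hsh]
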